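-- pv_equiv track=rewrite | github.com/mavdian14/Portfolio | Greedy/Jim and the Orders.py | jimOrders
-- ===== SOURCE A (Python) =====
-- def jimOrders(orders):
--     d = {}
--     for i in range(len(orders)):
--         serve_time = sum(orders[i])
--         if serve_time not in d:
--             d[serve_time] = [i+1]
--         else:
--             d[serve_time].append(i+1)
--
--     result = []
--     for serve_time in sorted(d.keys()):
--         result.extend(d[serve_time])
--
--     return result
-- ===== SOURCE B (Python) =====
-- def jimOrders(orders):
--     return sorted(range(1, len(orders) + 1), key=lambda i: sum(orders[i - 1]))
-- ===== Notes on version B (the rewrite author's own statement) =====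
-- stated objective: simpler
-- what changed: Replaces the explicit serve-time bucket dictionary plus sorted-keys flatten pass with a single stable keyed sort of the index range, relying on sort stability to reproduce the ordered-bucket tie-breaking.
import Mathlib
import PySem

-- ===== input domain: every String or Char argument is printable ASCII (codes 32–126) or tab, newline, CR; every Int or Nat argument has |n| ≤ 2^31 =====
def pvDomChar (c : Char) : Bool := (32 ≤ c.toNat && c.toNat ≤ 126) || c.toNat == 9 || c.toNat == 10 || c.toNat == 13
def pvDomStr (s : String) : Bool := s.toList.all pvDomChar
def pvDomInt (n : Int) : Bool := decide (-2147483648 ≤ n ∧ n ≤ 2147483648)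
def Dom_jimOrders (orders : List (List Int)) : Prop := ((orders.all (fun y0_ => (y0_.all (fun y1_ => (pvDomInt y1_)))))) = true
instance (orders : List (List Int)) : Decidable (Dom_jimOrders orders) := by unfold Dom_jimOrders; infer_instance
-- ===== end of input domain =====

-- B replaces A's serve-time bucket dictionary + sorted-keys flatten with one stable keyed
-- sort of the index range (objective: simpler); A and B are proved to return the same list.

-- ===== PORT A =====
-- loop body of A's first pass: the if/else on 'serve_time not in d'
def jimStepA (d : PySem.Dict Int (List Int)) (t j : Int) : PySem.Dict Int (List Int) :=
  if d.contains t = false then d.insert t [j]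
  else d.insert t (d.getD t [] ++ [j])

def jimOrders (orders : List (List Int)) : List Int :=
  let d := (PySem.List.pyRange 0 (orders.length : Int) 1).foldl
      (fun d i => jimStepA d (PySem.List.pyGetD orders i []).sum (i + 1)) PySem.Dict.empty
  -- second pass: result.extend(d[serve_time]); serve_time ∈ d.keys, so d[serve_time] never raises
  (PySem.List.sorted d.keys (fun k => k) false).foldl
      (fun result serve_time => result ++ d.getD serve_time []) []

-- ===== PORT B =====
def jimOrders_alt (orders : List (List Int)) : List Int :=
  PySem.List.sorted (PySem.List.pyRange 1 ((orders.length : Int) + 1) 1)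
    (fun i => (PySem.List.pyGetD orders (i - 1) []).sum) false

-- ===== PRECONDITION & SPEC =====
def Spec_jimOrders (orders : List (List Int)) (out : List Int) : Prop := out = jimOrders_alt orders
instance (orders : List (List Int)) (out : List Int) : Decidable (Spec_jimOrders orders out) := by unfold Spec_jimOrders; infer_instance

-- ===== CLAIM (what is proved, stated in full; the proofs are below) =====
def Claim_equal_jimOrders : Prop := ∀ (orders : List (List Int)), Dom_jimOrders orders → Spec_jimOrders orders (jimOrders orders)

-- ===== LEMMAS AND PROOFS =====

-- the key function B sorts by
def jimKey (orders : List (List Int)) (i : Int) : Int := (PySem.List.pyGetD orders (i - 1) []).sum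

-- A's first pass, re-indexed so the folded value j is the stored index itself
def jimBuild (f : Int → Int) (js : List Int) : PySem.Dict Int (List Int) :=
  js.foldl (fun d j => jimStepA d (f j) j) PySem.Dict.empty

-- A's second pass, as a flatMap over the sorted keys
def jimFlat (d : PySem.Dict Int (List Int)) : List Int :=
  (PySem.List.sorted d.keys (fun k => k) false).flatMap (fun k => d.getD k [])

-- invariant of A's dictionary: distinct keys, and every index stored under key k has key value k
def jimInv (f : Int → Int) (d : PySem.Dict Int (List Int)) : Prop :=
  d.keys.Nodup ∧ ∀ k ∈ d.keys, ∀ x ∈ d.getD k [], f x = k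

lemma insertBy_cons_pos {α : Type} (before : α → α → Bool) (x y : α) (ys : List α)
    (h : before x y = true) :
    PySem.List.insertBy before x (y :: ys) = x :: y :: ys := by
  simp [PySem.List.insertBy, h]

lemma insertBy_cons_neg {α : Type} (before : α → α → Bool) (x y : α) (ys : List α)
    (h : before x y = false) :
    PySem.List.insertBy before x (y :: ys) = y :: PySem.List.insertBy before x ys := by
  simp [PySem.List.insertBy, h]

lemma insertBy_of_forall_before {α : Type} (before : α → α → Bool) (x : α) (ys : List α)
    (h : ∀ y ∈ ys, before x y = true) :
    PySem.List.insertBy before x ys = x :: ys := by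
  cases ys with
  | nil => rfl
  | cons y ys => exact insertBy_cons_pos before x y ys (h y (by simp))

lemma insertBy_append_of_forall_not {α : Type} (before : α → α → Bool) (x : α)
    (ys zs : List α) (h : ∀ y ∈ ys, before x y = false) :
    PySem.List.insertBy before x (ys ++ zs) = ys ++ PySem.List.insertBy before x zs := by
  induction ys with
  | nil => simp
  | cons y ys ih =>
    rw [List.cons_append, insertBy_cons_neg before x y (ys ++ zs) (h y (by simp)),
      ih (fun y hy => h y (by simp [hy])), List.cons_append]

-- inserting a fresh index into the flattened blocks, new serve time: a new singleton block appears
lemma ins_flatMap_not_mem (f : Int → Int) (j : Int) (g : Int → List Int) :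
    ∀ ks : List Int, ks.Pairwise (· < ·) → f j ∉ ks →
    (∀ k ∈ ks, ∀ x ∈ g k, f x = k) →
    PySem.List.insertBy (fun a b => decide (f a < f b)) j (ks.flatMap g) =
      (PySem.List.insertBy (fun a b => decide (a < b)) (f j) ks).flatMap
        (fun k => if k = f j then [j] else g k) := by
  intro ks
  induction ks with
  | nil => intro _ _ _; simp [PySem.List.insertBy]
  | cons k rest ih =>
    intro hpw hmem hkey
    have hpwr : rest.Pairwise (· < ·) := hpw.of_cons
    have hklt : ∀ k' ∈ rest, k < k' := fun k' hk' => (List.pairwise_cons.mp hpw).1 k' hk'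
    by_cases hlt : f j < k
    · have hall : ∀ y ∈ (k :: rest).flatMap g, (fun a b => decide (f a < f b)) j y = true := by
        intro y hy
        obtain ⟨k', hk', hy'⟩ := List.mem_flatMap.mp hy
        have : f y = k' := hkey k' hk' y hy'
        have hk'k : k ≤ k' := by
          rcases hk' with _ | hk' 
          · exact le_refl _
          · exact le_of_lt (hklt k' (by assumption))
        simp only [decide_eq_true_eq]; omega
      rw [insertBy_of_forall_before _ _ _ hall,
        insertBy_cons_pos _ _ _ _ (by simp only [decide_eq_true_eq]; exact hlt)]
      have hgcongr : ∀ k' ∈ k :: rest, (if k' = f j then [j] else g k') = g k' := by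
        intro k' hk'
        have : f j < k' := by
          rcases hk' with _ | hk'
          · exact hlt
          · exact lt_trans hlt (hklt k' (by assumption))
        simp [show k' ≠ f j by omega]
      conv_rhs => rw [List.flatMap_cons]
      rw [if_pos rfl, List.flatMap_congr hgcongr]
      simp
    · have hne : f j ≠ k := fun h => hmem (h ▸ List.mem_cons_self)
      have hkfj : k < f j := by omega
      have hgk : ∀ y ∈ g k, (fun a b => decide (f a < f b)) j y = false := by
        intro y hy
        have : f y = k := hkey k List.mem_cons_self y hy
        simp only [decide_eq_false_iff_not]; omega
      rw [List.flatMap_cons, insertBy_append_of_forall_not _ _ _ _ hgk,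
        ih hpwr (fun h => hmem (List.mem_cons_of_mem _ h))
          (fun k' hk' x hx => hkey k' (List.mem_cons_of_mem _ hk') x hx),
        insertBy_cons_neg _ _ _ _ (by simp only [decide_eq_false_iff_not]; omega),
        List.flatMap_cons, if_neg (show ¬(k = f j) by omega)]

-- inserting a fresh index whose serve time already has a block: it lands at the end of that block
lemma ins_flatMap_mem (f : Int → Int) (j : Int) (g : Int → List Int) :
    ∀ ks : List Int, ks.Pairwise (· < ·) → f j ∈ ks →
    (∀ k ∈ ks, ∀ x ∈ g k, f x = k) →
    PySem.List.insertBy (fun a b => decide (f a < f b)) j (ks.flatMap g) =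
      ks.flatMap (fun k => if k = f j then g k ++ [j] else g k) := by
  intro ks
  induction ks with
  | nil => intro _ h _; simp at h
  | cons k rest ih =>
    intro hpw hmem hkey
    have hpwr : rest.Pairwise (· < ·) := hpw.of_cons
    have hklt : ∀ k' ∈ rest, k < k' := fun k' hk' => (List.pairwise_cons.mp hpw).1 k' hk'
    rcases List.mem_cons.mp hmem with heq | hmemr
    · have hgk : ∀ y ∈ g k, (fun a b => decide (f a < f b)) j y = false := by
        intro y hy
        have : f y = k := hkey k List.mem_cons_self y hy
        simp only [decide_eq_false_iff_not]; omega
      have hrest : ∀ y ∈ rest.flatMap g, (fun a b => decide (f a < f b)) j y = true := by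
        intro y hy
        obtain ⟨k', hk', hy'⟩ := List.mem_flatMap.mp hy
        have : f y = k' := hkey k' (List.mem_cons_of_mem _ hk') y hy'
        have := hklt k' hk'
        simp only [decide_eq_true_eq]; omega
      have hgcongr : ∀ k' ∈ rest, (if k' = f j then g k' ++ [j] else g k') = g k' := by
        intro k' hk'
        have := hklt k' hk'
        simp [show k' ≠ f j by omega]
      rw [List.flatMap_cons, insertBy_append_of_forall_not _ _ _ _ hgk,
        insertBy_of_forall_before _ _ _ hrest, List.flatMap_cons,
        List.flatMap_congr hgcongr, if_pos heq.symm]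
      simp
    · have hkfj : k < f j := hklt _ hmemr
      have hgk : ∀ y ∈ g k, (fun a b => decide (f a < f b)) j y = false := by
        intro y hy
        have : f y = k := hkey k List.mem_cons_self y hy
        simp only [decide_eq_false_iff_not]; omega
      rw [List.flatMap_cons, insertBy_append_of_forall_not _ _ _ _ hgk,
        ih hpwr hmemr (fun k' hk' x hx => hkey k' (List.mem_cons_of_mem _ hk') x hx),
        List.flatMap_cons, if_neg (show ¬(k = f j) by omega)]

lemma sorted_keys_pairwise_lt (d : PySem.Dict Int (List Int)) (hnd : d.keys.Nodup) :
    (PySem.List.sorted d.keys (fun k => k) false).Pairwise (· < ·) := by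
  have hle := PySem.List.sorted_pairwise d.keys (fun k => k)
  have hnd' : (PySem.List.sorted d.keys (fun k => k) false).Nodup :=
    (PySem.List.sorted_perm d.keys (fun k => k) false).symm.nodup hnd
  have := List.Pairwise.and hle hnd'
  exact this.imp (fun h => lt_of_le_of_ne h.1 h.2)

lemma jimFlat_step (f : Int → Int) (d : PySem.Dict Int (List Int)) (j : Int)
    (h : jimInv f d) :
    jimFlat (jimStepA d (f j) j) =
      PySem.List.insertBy (fun a b => decide (f a < f b)) j (jimFlat d) := by
  obtain ⟨hnd, hkey⟩ := h
  have hpw := sorted_keys_pairwise_lt d hnd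
  have hskey : ∀ k ∈ PySem.List.sorted d.keys (fun k => k) false, ∀ x ∈ d.getD k [], f x = k := by
    intro k hk
    exact hkey k ((PySem.List.mem_sorted _ _ _ _).mp hk)
  by_cases hc : d.contains (f j) = false
  · have hmemk : f j ∉ d.keys := by
      intro hm
      rw [(PySem.Dict.contains_iff_mem_keys d (f j)).mpr hm] at hc
      exact Bool.true_eq_false.mp hc
    have hmem : f j ∉ PySem.List.sorted d.keys (fun k => k) false :=
      fun hm => hmemk ((PySem.List.mem_sorted _ _ _ _).mp hm)
    have hgd : (fun k => (d.insert (f j) [j]).getD k []) =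
        (fun k => if k = f j then [j] else d.getD k []) := by
      funext k
      by_cases hk : k = f j
      · subst hk; simp [PySem.Dict.getD_insert_self]
      · simp [hk, PySem.Dict.getD_insert_of_ne d _ _ hk]
    have hkeys : (d.insert (f j) [j]).keys = d.keys ++ [f j] :=
      PySem.Dict.keys_insert_of_not_contains d [j] hc
    have hsorted : PySem.List.sorted (d.keys ++ [f j]) (fun k => k) false =
        PySem.List.insertBy (fun a b => decide (a < b)) (f j)
          (PySem.List.sorted d.keys (fun k => k) false) := by
      rw [PySem.List.sorted_eq_foldl_insertBy, PySem.List.sorted_eq_foldl_insertBy,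
        List.foldl_append]
      rfl
    rw [jimStepA, if_pos hc, jimFlat, hkeys, hsorted, hgd, jimFlat,
      ins_flatMap_not_mem f j _ _ hpw hmem hskey]
  · have hc' : d.contains (f j) = true := by
      cases hcc : d.contains (f j)
      · exact absurd hcc hc
      · rfl
    have hmemk : f j ∈ d.keys := (PySem.Dict.contains_iff_mem_keys d (f j)).mp hc'
    have hmem : f j ∈ PySem.List.sorted d.keys (fun k => k) false :=
      (PySem.List.mem_sorted _ _ _ _).mpr hmemk
    have hgd : (fun k => (d.insert (f j) (d.getD (f j) [] ++ [j])).getD k []) =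
        (fun k => if k = f j then d.getD k [] ++ [j] else d.getD k []) := by
      funext k
      by_cases hk : k = f j
      · subst hk; simp [PySem.Dict.getD_insert_self]
      · simp [hk, PySem.Dict.getD_insert_of_ne d _ _ hk]
    have hkeys : (d.insert (f j) (d.getD (f j) [] ++ [j])).keys = d.keys :=
      PySem.Dict.keys_insert_of_contains d _ hc'
    rw [jimStepA, if_neg hc, jimFlat, hkeys, hgd, jimFlat,
      ins_flatMap_mem f j _ _ hpw hmem hskey]

lemma jimInv_step (f : Int → Int) (d : PySem.Dict Int (List Int)) (j : Int)
    (h : jimInv f d) : jimInv f (jimStepA d (f j) j) := by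
  obtain ⟨hnd, hkey⟩ := h
  by_cases hc : d.contains (f j) = false
  · rw [jimStepA, if_pos hc]
    refine ⟨PySem.Dict.nodup_keys_insert d _ _ hnd, ?_⟩
    intro k hk x hx
    by_cases hkfj : k = f j
    · subst hkfj
      rw [PySem.Dict.getD_insert_self] at hx
      simp at hx; rw [hx]
    · rw [PySem.Dict.getD_insert_of_ne d _ _ hkfj] at hx
      rw [PySem.Dict.keys_insert_of_not_contains d _ hc, List.mem_append] at hk
      rcases hk with hk | hk
      · exact hkey k hk x hx
      · simp at hk; exact absurd hk hkfj
  · have hc' : d.contains (f j) = true := by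
      cases hcc : d.contains (f j)
      · exact absurd hcc hc
      · rfl
    rw [jimStepA, if_neg hc]
    refine ⟨PySem.Dict.nodup_keys_insert d _ _ hnd, ?_⟩
    intro k hk x hx
    rw [PySem.Dict.keys_insert_of_contains d _ hc'] at hk
    by_cases hkfj : k = f j
    · subst hkfj
      rw [PySem.Dict.getD_insert_self] at hx
      rw [List.mem_append] at hx
      rcases hx with hx | hx
      · exact hkey _ hk x hx
      · simp at hx; rw [hx]
    · rw [PySem.Dict.getD_insert_of_ne d _ _ hkfj] at hx
      exact hkey k hk x hx

lemma jimInv_build (f : Int → Int) (js : List Int) : jimInv f (jimBuild f js) := by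
  have : ∀ d, jimInv f d → jimInv f (js.foldl (fun d j => jimStepA d (f j) j) d) := by
    induction js with
    | nil => intro d hd; exact hd
    | cons j js ih => intro d hd; exact ih _ (jimInv_step f d j hd)
  refine this PySem.Dict.empty ⟨?_, ?_⟩
  · rw [PySem.Dict.keys_empty]; exact List.nodup_nil
  · intro k hk; rw [PySem.Dict.keys_empty] at hk; exact absurd hk (List.not_mem_nil)

lemma jimFlat_build (f : Int → Int) (js : List Int) :
    jimFlat (jimBuild f js) = PySem.List.sorted js f false := by
  rw [PySem.List.sorted_eq_foldl_insertBy]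
  induction js using List.reverseRecOn with
  | nil =>
    simp only [jimBuild, List.foldl_nil, jimFlat, PySem.Dict.keys_empty]
    rfl
  | append_singleton js j ih =>
    have hb : jimBuild f (js ++ [j]) = jimStepA (jimBuild f js) (f j) j := by
      rw [jimBuild, List.foldl_append]; rfl
    rw [hb, jimFlat_step f _ j (jimInv_build f js), ih, List.foldl_append]
    rfl

lemma jimRange_shift (b : Int) :
    PySem.List.pyRange 1 (b + 1) 1 = (PySem.List.pyRange 0 b 1).map (· + 1) := by
  rw [PySem.List.pyRange_one, PySem.List.pyRange_one, List.map_map]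
  have h1 : b + 1 - 1 = b - 0 := by ring
  rw [h1]
  apply List.map_congr_left
  intro k _
  simp; omega

-- ===== VERDICT (by name: the statement is the Claim_ definition above) =====
theorem jimOrders_spec : Claim_equal_jimOrders := by
  intro orders _
  unfold Spec_jimOrders jimOrders jimOrders_alt
  have hbody : (fun (d : PySem.Dict Int (List Int)) (i : Int) =>
      jimStepA d (PySem.List.pyGetD orders i []).sum (i + 1)) =
      (fun d i => jimStepA d (jimKey orders (i + 1)) (i + 1)) := by
    funext d i
    simp [jimKey]
  have hdict : (PySem.List.pyRange 0 (orders.length : Int) 1).foldl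
      (fun d i => jimStepA d (PySem.List.pyGetD orders i []).sum (i + 1)) PySem.Dict.empty =
      jimBuild (jimKey orders) (PySem.List.pyRange 1 ((orders.length : Int) + 1) 1) := by
    rw [hbody, jimBuild, jimRange_shift, List.foldl_map]
  rw [hdict, PySem.List.foldl_append_eq_flatMap, List.nil_append]
  exact jimFlat_build (jimKey orders) _
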